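-- pv_equiv track=rewrite | github.com/prdx33/dotfiles | .config/sketchybar/icons/generate_icons.py | flame
-- ===== SOURCE A (Python) =====
-- def flame(orange, yellow):
--     """Flame shape"""
--     pixels = {}
--     pattern_orange = [
--         "    ##    ",
--         "   ####   ",
--         "   ####   ",
--         "  ######  ",
--         "  ######  ",
--         " ######## ",
--         " ######## ",
--         " ######## ",
--         "  ######  ",
--         "   ####   ",
--     ]
--     pattern_yellow = [
--         "          ",
--         "          ",
--         "    ##    ",
--         "   ####   ",
--         "   ####   ",
--         "   ####   ",
--         "  ######  ",
--         "  ######  ",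
--         "   ####   ",
--         "    ##    ",
--     ]
--     for y, row in enumerate(pattern_orange):
--         for x, char in enumerate(row):
--             if char == '#':
--                 pixels[(x, y)] = orange
--     for y, row in enumerate(pattern_yellow):
--         for x, char in enumerate(row):
--             if char == '#':
--                 pixels[(x, y)] = yellow
--     return pixels
-- ===== SOURCE B (Python) =====
-- def flame(orange, yellow):
--     """Flame shape"""
--     pattern_orange = [
--         "    ##    ",
--         "   ####   ",
--         "   ####   ",
--         "  ######  ",
--         "  ######  ",
--         " ######## ",
--         " ######## ",
--         " ######## ",
--         "  ######  ",
--         "   ####   ",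
--     ]
--     pattern_yellow = [
--         "          ",
--         "          ",
--         "    ##    ",
--         "   ####   ",
--         "   ####   ",
--         "   ####   ",
--         "  ######  ",
--         "  ######  ",
--         "   ####   ",
--         "    ##    ",
--     ]
--     return {
--         (x, y): (yellow if yc == '#' else orange)
--         for y, (orow, yrow) in enumerate(zip(pattern_orange, pattern_yellow))
--         for x, (oc, yc) in enumerate(zip(orow, yrow))
--         if oc == '#' or yc == '#'
--     }
-- ===== Notes on version B (the rewrite author's own statement) =====
-- stated objective: simpler
-- what changed: A writes all orange pixels in one pass and then overwrites some of them in a second yellow pass; B makes a single pass over the two patterns zipped row by row, emitting each pixel once with explicit yellow-over-orange precedence (yellow char checked first), as a dict comprehension.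
import Mathlib
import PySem

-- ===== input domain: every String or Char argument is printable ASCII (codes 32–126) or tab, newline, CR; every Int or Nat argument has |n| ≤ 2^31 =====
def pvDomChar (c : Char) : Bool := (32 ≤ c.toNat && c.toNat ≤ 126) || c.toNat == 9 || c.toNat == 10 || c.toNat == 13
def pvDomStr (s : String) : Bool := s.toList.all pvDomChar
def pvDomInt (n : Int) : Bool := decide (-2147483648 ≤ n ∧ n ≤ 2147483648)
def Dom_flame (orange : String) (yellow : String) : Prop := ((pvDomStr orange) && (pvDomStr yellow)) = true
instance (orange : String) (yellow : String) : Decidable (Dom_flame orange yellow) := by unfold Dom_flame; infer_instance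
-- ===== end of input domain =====

-- B replaces A's two sequential pattern passes (orange written, then yellow overwriting) by one
-- combined zipped pass with explicit yellow-over-orange precedence (objective: simpler).

-- ===== PORT A =====
-- the two fixed pattern constants, shared data of both programs
def flamePatternOrange : List String :=
  [ "    ##    ",
    "   ####   ",
    "   ####   ",
    "  ######  ",
    "  ######  ",
    " ######## ",
    " ######## ",
    " ######## ",
    "  ######  ",
    "   ####   " ]

def flamePatternYellow : List String :=
  [ "          ",
    "          ",
    "    ##    ",
    "   ####   ",
    "   ####   ",
    "   ####   ",
    "  ######  ",
    "  ######  ",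
    "   ####   ",
    "    ##    " ]

def flame (orange : String) (yellow : String) : List (Int × Int × String) :=
  let d1 := (PySem.List.enumerate flamePatternOrange).foldl
    (fun d p =>
      (PySem.List.enumerate p.2.toList).foldl
        (fun d q => if q.2 = '#' then d.insert (q.1, p.1) orange else d) d)
    PySem.Dict.empty
  let d2 := (PySem.List.enumerate flamePatternYellow).foldl
    (fun d p =>
      (PySem.List.enumerate p.2.toList).foldl
        (fun d q => if q.2 = '#' then d.insert (q.1, p.1) yellow else d) d)
    d1
  d2.items.map (fun t => (t.1.1, t.1.2, t.2))

-- ===== PORT B =====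
-- the dict comprehension: generate the (key, colour) pairs in one zipped pass, then build the dict
def flame_alt (orange : String) (yellow : String) : List (Int × Int × String) :=
  let pairs := (PySem.List.enumerate (flamePatternOrange.zip flamePatternYellow)).flatMap
    (fun p =>
      (PySem.List.enumerate (p.2.1.toList.zip p.2.2.toList)).filterMap
        (fun q =>
          if q.2.1 = '#' ∨ q.2.2 = '#' then
            some ((q.1, p.1), if q.2.2 = '#' then yellow else orange)
          else none))
  (pairs.foldl (fun d p => d.insert p.1 p.2)
    (PySem.Dict.empty : PySem.Dict (Int × Int) String)).items.map (fun t => (t.1.1, t.1.2, t.2))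

-- ===== PRECONDITION & SPEC =====
def Spec_flame (orange : String) (yellow : String) (out : List (Int × Int × String)) : Prop := out = flame_alt orange yellow
instance (orange : String) (yellow : String) (out : List (Int × Int × String)) : Decidable (Spec_flame orange yellow out) := by unfold Spec_flame; infer_instance

-- ===== CLAIM (what is proved, stated in full; the proofs are below) =====
def Claim_equal_flame : Prop := ∀ (orange : String) (yellow : String), Dom_flame orange yellow → Spec_flame orange yellow (flame orange yellow)

-- ===== LEMMAS AND PROOFS =====

-- map a function over the VALUES of a dict (keys and order untouched); proof-only helper
def pvMapVal {κ α β : Type} [BEq κ] (f : α → β) (d : PySem.Dict κ α) : PySem.Dict κ β :=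
  PySem.Dict.mk (d.items.map (fun p => (p.1, f p.2)))

theorem pvMapVal_contains {κ α β : Type} [BEq κ] [LawfulBEq κ] [DecidableEq κ]
    (f : α → β) (d : PySem.Dict κ α) (k : κ) :
    (pvMapVal f d).contains k = d.contains k := by
  rw [PySem.Dict.contains_eq_decide_mem_keys, PySem.Dict.contains_eq_decide_mem_keys]
  simp [pvMapVal, PySem.Dict.keys]

theorem pvMapVal_insert {κ α β : Type} [BEq κ] [LawfulBEq κ] [DecidableEq κ]
    (f : α → β) (d : PySem.Dict κ α) (k : κ) (v : α) :
    pvMapVal f (d.insert k v) = (pvMapVal f d).insert k (f v) := by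
  apply PySem.Dict.ext
  by_cases h : d.contains k = true
  · rw [show (pvMapVal f (d.insert k v)).items
        = (d.insert k v).items.map (fun p => (p.1, f p.2)) from rfl,
      PySem.Dict.items_insert_of_contains d v h,
      PySem.Dict.items_insert_of_contains (pvMapVal f d) (f v) (by rw [pvMapVal_contains]; exact h)]
    simp only [pvMapVal, List.map_map]
    apply List.map_congr_left
    intro p _
    cases hpk : p.1 == k <;> simp [Function.comp, hpk]
  · rw [show (pvMapVal f (d.insert k v)).items
        = (d.insert k v).items.map (fun p => (p.1, f p.2)) from rfl,
      PySem.Dict.items_insert_of_not_contains d v (Bool.eq_false_iff.mpr h),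
      PySem.Dict.items_insert_of_not_contains (pvMapVal f d) (f v)
        (by rw [pvMapVal_contains]; exact Bool.eq_false_iff.mpr h)]
    simp [pvMapVal]

theorem pvMapVal_empty {κ α β : Type} [BEq κ] (f : α → β) :
    pvMapVal f (PySem.Dict.empty : PySem.Dict κ α) = PySem.Dict.empty := rfl

-- one pattern pass of A, generalised over the colour's type
def pvPass {α : Type} (c : α) (L : List String) (d : PySem.Dict (Int × Int) α) :
    PySem.Dict (Int × Int) α :=
  (PySem.List.enumerate L).foldl
    (fun d p =>
      (PySem.List.enumerate p.2.toList).foldl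
        (fun d q => if q.2 = '#' then d.insert (q.1, p.1) c else d) d) d

theorem pvMapVal_rowFold {α β : Type} (f : α → β) (r : List (Int × Char)) (yidx : Int)
    (c : α) (d : PySem.Dict (Int × Int) α) :
    pvMapVal f (r.foldl (fun d q => if q.2 = '#' then d.insert (q.1, yidx) c else d) d)
      = r.foldl (fun d q => if q.2 = '#' then d.insert (q.1, yidx) (f c) else d) (pvMapVal f d) := by
  induction r generalizing d with
  | nil => rfl
  | cons q r ih =>
      simp only [List.foldl_cons]
      split_ifs with h
      · rw [ih, pvMapVal_insert]
      · rw [ih]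

theorem pvMapVal_pass {α β : Type} (f : α → β) (c : α) (L : List String) (s : Int)
    (d : PySem.Dict (Int × Int) α) :
    pvMapVal f ((PySem.List.enumerate L s).foldl
        (fun d p =>
          (PySem.List.enumerate p.2.toList).foldl
            (fun d q => if q.2 = '#' then d.insert (q.1, p.1) c else d) d) d)
      = (PySem.List.enumerate L s).foldl
          (fun d p =>
            (PySem.List.enumerate p.2.toList).foldl
              (fun d q => if q.2 = '#' then d.insert (q.1, p.1) (f c) else d) d) (pvMapVal f d) := by
  induction L generalizing s d with
  | nil => rfl
  | cons row L ih =>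
      rw [PySem.List.enumerate_cons, List.foldl_cons, List.foldl_cons, ih, pvMapVal_rowFold]

theorem pvMapVal_foldl_insert {κ α β : Type} [BEq κ] [LawfulBEq κ] [DecidableEq κ]
    (f : α → β) (l : List (κ × α)) (d : PySem.Dict κ α) :
    pvMapVal f (l.foldl (fun d p => d.insert p.1 p.2) d)
      = (l.map (fun p => (p.1, f p.2))).foldl (fun d p => d.insert p.1 p.2) (pvMapVal f d) := by
  induction l generalizing d with
  | nil => rfl
  | cons p l ih => rw [List.map_cons, List.foldl_cons, List.foldl_cons, ih, pvMapVal_insert]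

-- the Bool-valued skeletons of the two programs (value true = yellow wins, false = orange)
def pvDA : PySem.Dict (Int × Int) Bool :=
  pvPass true flamePatternYellow (pvPass false flamePatternOrange PySem.Dict.empty)

def pvPairsBool : List ((Int × Int) × Bool) :=
  (PySem.List.enumerate (flamePatternOrange.zip flamePatternYellow)).flatMap
    (fun p =>
      (PySem.List.enumerate (p.2.1.toList.zip p.2.2.toList)).filterMap
        (fun q =>
          if q.2.1 = '#' ∨ q.2.2 = '#' then some ((q.1, p.1), decide (q.2.2 = '#'))
          else none))

def pvDB : PySem.Dict (Int × Int) Bool :=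
  pvPairsBool.foldl (fun d p => d.insert p.1 p.2) PySem.Dict.empty

theorem pv_flame_eq (orange yellow : String) :
    flame orange yellow
      = pvDA.items.map (fun p => (p.1.1, p.1.2, if p.2 then yellow else orange)) := by
  show (pvPass yellow flamePatternYellow (pvPass orange flamePatternOrange PySem.Dict.empty)).items.map
        (fun t => (t.1.1, t.1.2, t.2))
      = pvDA.items.map (fun p => (p.1.1, p.1.2, if p.2 then yellow else orange))
  have h : pvMapVal (fun b : Bool => if b then yellow else orange) pvDA
      = pvPass ((fun b : Bool => if b then yellow else orange) true) flamePatternYellow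
          (pvPass ((fun b : Bool => if b then yellow else orange) false) flamePatternOrange
            (pvMapVal (fun b : Bool => if b then yellow else orange) PySem.Dict.empty)) := by
    unfold pvDA pvPass
    rw [pvMapVal_pass, pvMapVal_pass]
  rw [show pvPass yellow flamePatternYellow (pvPass orange flamePatternOrange PySem.Dict.empty)
      = pvMapVal (fun b : Bool => if b then yellow else orange) pvDA from h.symm]
  simp [pvMapVal, List.map_map, Function.comp]

theorem pv_flame_alt_eq (orange yellow : String) :
    flame_alt orange yellow
      = pvDB.items.map (fun p => (p.1.1, p.1.2, if p.2 then yellow else orange)) := by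
  have hpairs :
      ((PySem.List.enumerate (flamePatternOrange.zip flamePatternYellow)).flatMap
        (fun p =>
          (PySem.List.enumerate (p.2.1.toList.zip p.2.2.toList)).filterMap
            (fun q =>
              if q.2.1 = '#' ∨ q.2.2 = '#' then
                some ((q.1, p.1), if q.2.2 = '#' then yellow else orange)
              else none)))
        = pvPairsBool.map (fun p => (p.1, if p.2 then yellow else orange)) := by
    unfold pvPairsBool
    rw [List.map_flatMap]
    apply List.flatMap_congr
    intro p _
    rw [List.map_filterMap]
    apply List.filterMap_congr
    intro q _
    by_cases h2 : q.2.2 = '#' <;> by_cases h1 : q.2.1 = '#' <;> simp [h1, h2]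
  show ((((PySem.List.enumerate (flamePatternOrange.zip flamePatternYellow)).flatMap
        (fun p =>
          (PySem.List.enumerate (p.2.1.toList.zip p.2.2.toList)).filterMap
            (fun q =>
              if q.2.1 = '#' ∨ q.2.2 = '#' then
                some ((q.1, p.1), if q.2.2 = '#' then yellow else orange)
              else none))).foldl (fun d p => d.insert p.1 p.2)
      (PySem.Dict.empty : PySem.Dict (Int × Int) String)).items).map (fun t => (t.1.1, t.1.2, t.2))
    = _
  rw [hpairs, ← pvMapVal_empty (fun b : Bool => if b then yellow else orange),
    ← pvMapVal_foldl_insert]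
  simp [pvMapVal, pvDB, List.map_map, Function.comp]

-- the two closed Bool-valued skeletons agree item for item
set_option maxRecDepth 100000 in
theorem pv_items_eq : pvDA.items = pvDB.items := by decide

-- ===== VERDICT (by name: the statement is the Claim_ definition above) =====
theorem flame_spec : Claim_equal_flame := by
  intro orange yellow _
  show flame orange yellow = flame_alt orange yellow
  rw [pv_flame_eq, pv_flame_alt_eq, pv_items_eq]
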